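-- pv_equiv track=rewrite | github.com/skhanzad/AgentGraph | agents/devops.py | _infer_entry_file
-- ===== SOURCE A (Python) =====
-- def _task_files(task_list: list[dict]) -> list[str]:
--     return [str(task.get("file", "")).strip() for task in task_list if str(task.get("file", "")).strip()]
--
-- def _infer_entry_file(task_list: list[dict], code_artifacts: dict[str, str]) -> str:
--     """Pick the most likely runnable Python entrypoint."""
--     task_files = _task_files(task_list)
--     file_to_task_id = {
--         str(task.get("file", "")).strip(): str(task.get("id", "")).strip()
--         for task in task_list
--         if str(task.get("file", "")).strip()
--     }
--     candidates = [path for path in task_files if path.endswith(".py") and "test" not in path.lower()]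
--     preferred_patterns = (
--         "main.py",
--         "app.py",
--         "__main__.py",
--         "cli.py",
--         "server.py",
--         "run.py",
--     )
--     for pattern in preferred_patterns:
--         for path in candidates:
--             if path.endswith(pattern):
--                 return path
--
--     for path in candidates:
--         code = code_artifacts.get(file_to_task_id.get(path, path), "")
--         if "if __name__ == \"__main__\":" in code or "if __name__ == '__main__':" in code:
--             return path
--
--     return candidates[0] if candidates else "main.py"
-- ===== SOURCE B (Python) =====
-- def _infer_entry_file(task_list: list[dict], code_artifacts: dict[str, str]) -> str:
--     """Pick the most likely runnable Python entrypoint."""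
--     preferred_patterns = (
--         "main.py",
--         "app.py",
--         "__main__.py",
--         "cli.py",
--         "server.py",
--         "run.py",
--     )
--     file_to_task_id = {}
--     candidates = []
--     for task in task_list:
--         f = str(task.get("file", "")).strip()
--         if f:
--             file_to_task_id[f] = str(task.get("id", "")).strip()
--             if f.endswith(".py") and "test" not in f.lower():
--                 candidates.append(f)
--
--     best_pr, best = len(preferred_patterns), ""
--     for path in candidates:
--         pr = next((k for k, pat in enumerate(preferred_patterns) if path.endswith(pat)),
--                   len(preferred_patterns))
--         if pr < best_pr:
--             best_pr, best = pr, path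
--     if best_pr < len(preferred_patterns):
--         return best
--
--     for path in candidates:
--         code = code_artifacts.get(file_to_task_id.get(path, path), "")
--         if "if __name__ == \"__main__\":" in code or "if __name__ == '__main__':" in code:
--             return path
--
--     return candidates[0] if candidates else "main.py"
-- ===== Notes on version B (the rewrite author's own statement) =====
-- stated objective: alternative
-- what changed: B builds the file->id map and the candidate list in one pass over task_list and replaces A's pattern-major nested scans with a single scoring pass that keeps the running argmin of (first-matching-pattern index, position); the __main__ scan and default are unchanged.
import Mathlib
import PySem

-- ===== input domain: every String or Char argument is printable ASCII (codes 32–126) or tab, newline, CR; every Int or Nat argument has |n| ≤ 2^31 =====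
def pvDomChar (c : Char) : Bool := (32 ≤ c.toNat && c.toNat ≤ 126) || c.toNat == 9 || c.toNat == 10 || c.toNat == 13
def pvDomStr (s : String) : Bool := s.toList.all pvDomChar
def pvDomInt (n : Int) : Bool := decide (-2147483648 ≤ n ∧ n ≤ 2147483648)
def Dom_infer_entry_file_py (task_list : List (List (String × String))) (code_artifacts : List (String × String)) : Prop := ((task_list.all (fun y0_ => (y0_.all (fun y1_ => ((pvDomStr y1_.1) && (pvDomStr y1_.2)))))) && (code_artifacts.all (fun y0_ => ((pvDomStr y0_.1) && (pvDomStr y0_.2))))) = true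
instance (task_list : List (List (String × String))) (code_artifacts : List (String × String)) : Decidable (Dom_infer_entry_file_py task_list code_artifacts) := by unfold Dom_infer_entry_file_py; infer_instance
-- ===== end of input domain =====

-- B replaces A's pattern-major nested scans by one argmin scoring pass and fuses the two
-- comprehensions over task_list into a single loop; same return value (alternative decomposition).

-- ===== PORT A =====

-- str(task.get("file", "")).strip()  (values are strings, str() is the identity)
def pvFileA (task : List (String × String)) : String :=
  PySem.Str.strip ((PySem.Dict.mk task).getD "file" "")

def pvIdA (task : List (String × String)) : String :=
  PySem.Str.strip ((PySem.Dict.mk task).getD "id" "")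

-- candidate filter: path.endswith(".py") and "test" not in path.lower()
def pvIsCand (p : String) : Bool :=
  PySem.Str.endswith p ".py" && !(PySem.Str.isIn "test" (PySem.Str.lower p))

-- the __main__-marker test of the second loop
def pvGuardA (fid : PySem.Dict String String) (code_artifacts : List (String × String)) (p : String) : Bool :=
  let code := (PySem.Dict.mk code_artifacts).getD (fid.getD p p) ""
  PySem.Str.isIn "if __name__ == \"__main__\":" code || PySem.Str.isIn "if __name__ == '__main__':" code

def pvPats : List String := ["main.py", "app.py", "__main__.py", "cli.py", "server.py", "run.py"]

def infer_entry_file_py (task_list : List (List (String × String))) (code_artifacts : List (String × String)) : String :=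
  let task_files := (task_list.map pvFileA).filter (fun s => s ≠ "")
  let file_to_task_id : PySem.Dict String String :=
    task_list.foldl (fun d t => let f := pvFileA t; if f ≠ "" then d.insert f (pvIdA t) else d)
      PySem.Dict.empty
  let candidates := task_files.filter pvIsCand
  -- for pattern in preferred_patterns: for path in candidates: if path.endswith(pattern): return path
  match pvPats.findSome? (fun pat => candidates.find? (fun p => PySem.Str.endswith p pat)) with
  | some p => p
  | none =>
    -- for path in candidates: if the "__main__" marker is in its code: return path
    match candidates.find? (pvGuardA file_to_task_id code_artifacts) with
    | some p => p
    | none => match candidates with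
              | [] => "main.py"
              | c :: _ => c

-- ===== PORT B =====

def pvFileB (task : List (String × String)) : String :=
  PySem.Str.strip ((PySem.Dict.mk task).getD "file" "")

def pvIdB (task : List (String × String)) : String :=
  PySem.Str.strip ((PySem.Dict.mk task).getD "id" "")

def pvGuardB (fid : PySem.Dict String String) (code_artifacts : List (String × String)) (p : String) : Bool :=
  let code := (PySem.Dict.mk code_artifacts).getD (fid.getD p p) ""
  PySem.Str.isIn "if __name__ == \"__main__\":" code || PySem.Str.isIn "if __name__ == '__main__':" code

-- next((k for k, pat in enumerate(preferred_patterns) if path.endswith(pat)), len(preferred_patterns))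
def pvPrio (p : String) : Nat := pvPats.findIdx (fun pat => PySem.Str.endswith p pat)

def infer_entry_file_py_alt (task_list : List (List (String × String))) (code_artifacts : List (String × String)) : String :=
  -- one loop building file_to_task_id and candidates together
  let st := task_list.foldl
    (fun (st : PySem.Dict String String × List String) task =>
      let f := pvFileB task
      if f ≠ "" then
        let d := st.1.insert f (pvIdB task)
        if PySem.Str.endswith f ".py" && !(PySem.Str.isIn "test" (PySem.Str.lower f)) then
          (d, st.2 ++ [f])
        else (d, st.2)
      else st)
    (PySem.Dict.empty, [])
  let file_to_task_id := st.1
  let candidates := st.2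
  -- running argmin of the pattern priority (strict < keeps the earliest candidate)
  let best := candidates.foldl
    (fun (b : Nat × String) p => let pr := pvPrio p; if pr < b.1 then (pr, p) else b)
    (pvPats.length, "")
  if best.1 < pvPats.length then best.2
  else
    match candidates.find? (pvGuardB file_to_task_id code_artifacts) with
    | some p => p
    | none => match candidates with
              | [] => "main.py"
              | c :: _ => c

-- ===== PRECONDITION & SPEC =====
def Spec_infer_entry_file_py (task_list : List (List (String × String))) (code_artifacts : List (String × String)) (out : String) : Prop := out = infer_entry_file_py_alt task_list code_artifacts
instance (task_list : List (List (String × String))) (code_artifacts : List (String × String)) (out : String) : Decidable (Spec_infer_entry_file_py task_list code_artifacts out) := by unfold Spec_infer_entry_file_py; infer_instance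

-- ===== CLAIM (what is proved, stated in full; the proofs are below) =====
def Claim_equal_infer_entry_file_py : Prop := ∀ (task_list : List (List (String × String))) (code_artifacts : List (String × String)), Dom_infer_entry_file_py task_list code_artifacts → Spec_infer_entry_file_py task_list code_artifacts (infer_entry_file_py task_list code_artifacts)

-- ===== LEMMAS AND PROOFS =====

-- the argmin step of B's scoring loop, for an arbitrary priority function
def pvStep (f : String → Nat) (b : Nat × String) (p : String) : Nat × String :=
  if f p < b.1 then (f p, p) else b

-- once the accumulator's priority is 0 the fold never changes it
lemma pvFold_zero (f : String → Nat) (cands : List String) (s : String) :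
    cands.foldl (pvStep f) (0, s) = (0, s) := by
  induction cands with
  | nil => rfl
  | cons c cs ih => simpa [pvStep] using ih

-- if some candidate has priority 0, the fold returns the first such candidate
lemma pvFold_find_zero (f : String → Nat) (cands : List String) (p : String) :
    ∀ b : Nat × String, 0 < b.1 →
      cands.find? (fun q => f q == 0) = some p →
      cands.foldl (pvStep f) b = (0, p) := by
  induction cands with
  | nil => intro b _ h; simp at h
  | cons c cs ih =>
    intro b hb h
    rw [List.find?_cons] at h
    by_cases hc : f c = 0
    · have hcb : (f c == 0) = true := by simp [hc]
      rw [hcb] at h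
      simp at h
      subst h
      have hstep : pvStep f b c = (0, c) := by simp [pvStep, hc, hb]
      rw [List.foldl_cons, hstep, pvFold_zero]
    · have hcb : (f c == 0) = false := by simp [hc]
      rw [hcb] at h
      simp at h
      rw [List.foldl_cons]
      refine ih _ ?_ h
      by_cases hlt : f c < b.1
      · simp [pvStep, hlt]; omega
      · simpa [pvStep, hlt] using hb

-- shifting every priority (and the initial bound) by one shifts the fold's result by one
lemma pvFold_shift (g : String → Nat) (cands : List String) :
    ∀ b : Nat × String,
      cands.foldl (pvStep (fun p => g p + 1)) (b.1 + 1, b.2) =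
        ((cands.foldl (pvStep g) b).1 + 1, (cands.foldl (pvStep g) b).2) := by
  induction cands with
  | nil => intro b; rfl
  | cons c cs ih =>
    intro b
    rw [List.foldl_cons, List.foldl_cons]
    by_cases hlt : g c < b.1
    · have h1 : g c + 1 < b.1 + 1 := by omega
      have e1 : pvStep (fun p => g p + 1) (b.1 + 1, b.2) c = ((g c, c).1 + 1, (g c, c).2) := by
        simp [pvStep, h1]
      have e2 : pvStep g b c = (g c, c) := by simp [pvStep, hlt]
      rw [e1, e2]; exact ih (g c, c)
    · have h1 : ¬ g c + 1 < b.1 + 1 := by omega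
      have e1 : pvStep (fun p => g p + 1) (b.1 + 1, b.2) c = (b.1 + 1, b.2) := by
        simp [pvStep, h1]
      have e2 : pvStep g b c = b := by simp [pvStep, hlt]
      rw [e1, e2]; exact ih b

-- A's pattern-major nested scan equals B's argmin scoring pass (for any match predicate e)
lemma pvScan_eq (e : String → String → Bool) (pats : List String) (cands : List String) :
    pats.findSome? (fun pat => cands.find? (fun p => e p pat)) =
      (let r := cands.foldl (pvStep (fun p => pats.findIdx (fun pat => e p pat)))
                  (pats.length, "")
       if r.1 < pats.length then some r.2 else none) := by
  induction pats with
  | nil =>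
    simp only [List.findSome?_nil, List.length_nil, List.findIdx_nil]
    rw [pvFold_zero]
    simp
  | cons pat rest ih =>
    rw [List.findSome?_cons]
    have hidx : (fun p => List.findIdx (fun pt => e p pt) (pat :: rest)) =
        (fun p => if e p pat then 0 else List.findIdx (fun pt => e p pt) rest + 1) := by
      funext q; rw [List.findIdx_cons]; cases e q pat <;> simp
    cases hfind : cands.find? (fun p => e p pat) with
    | some p =>
      have hpred : (fun q => ((if e q pat then 0
            else List.findIdx (fun pt => e q pt) rest + 1) == 0)) =
          (fun q => e q pat) := by
        funext q; cases e q pat <;> simp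
      have hfold := pvFold_find_zero
        (fun q => if e q pat then 0 else List.findIdx (fun pt => e q pt) rest + 1)
        cands p ((pat :: rest).length, "") (by simp) (by rw [hpred]; exact hfind)
      simp only [hidx]
      rw [hfold]
      simp
    | none =>
      have hnone := List.find?_eq_none.mp hfind
      have hcongr : cands.foldl
            (pvStep (fun p => List.findIdx (fun pt => e p pt) (pat :: rest)))
            ((pat :: rest).length, "") =
          cands.foldl (pvStep (fun p => List.findIdx (fun pt => e p pt) rest + 1))
            ((pat :: rest).length, "") := by
        refine PySem.List.foldl_congr_mem _ _ _ _ ?_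
        intro acc q hq
        have hq0 : e q pat = false := by
          cases h : e q pat
          · rfl
          · exact absurd h (by simpa using hnone q hq)
        have h1 : List.findIdx (fun pt => e q pt) (pat :: rest) =
            List.findIdx (fun pt => e q pt) rest + 1 := by
          rw [List.findIdx_cons, hq0]; simp
        simp only [pvStep, h1]
      rw [hcongr]
      rw [show ((pat :: rest).length, ("" : String)) =
          (((rest.length, ("" : String)).1 + 1), (rest.length, ("" : String)).2) from rfl]
      rw [pvFold_shift]
      simp only [List.length_cons, Nat.add_lt_add_iff_right]
      rw [ih]

-- B's fused loop equals A's dict fold and the filtered map of task_files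
lemma pvPairFold (tl : List (List (String × String))) :
    ∀ (d0 : PySem.Dict String String) (l0 : List String),
      tl.foldl
        (fun (st : PySem.Dict String String × List String) task =>
          let f := pvFileB task
          if f ≠ "" then
            let d := st.1.insert f (pvIdB task)
            if PySem.Str.endswith f ".py" && !(PySem.Str.isIn "test" (PySem.Str.lower f)) then
              (d, st.2 ++ [f])
            else (d, st.2)
          else st)
        (d0, l0) =
        (tl.foldl (fun d t => let f := pvFileA t; if f ≠ "" then d.insert f (pvIdA t) else d) d0,
         l0 ++ ((tl.map pvFileA).filter (fun s => s ≠ "")).filter pvIsCand) := by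
  induction tl with
  | nil => intro d0 l0; simp
  | cons t ts ih =>
    intro d0 l0
    rw [List.foldl_cons, List.foldl_cons, List.map_cons, List.filter_cons]
    simp only [show pvFileB = pvFileA from rfl, show pvIdB = pvIdA from rfl] at ih ⊢
    by_cases hf : pvFileA t = ""
    · rw [if_neg (by simp [hf]), if_neg (by simp [hf]), if_neg (by simp [hf])]
      exact ih d0 l0
    · rw [if_pos hf, if_pos hf]
      by_cases hc : pvIsCand (pvFileA t) = true
      · rw [if_pos (show (PySem.Str.endswith (pvFileA t) ".py" &&
            !(PySem.Str.isIn "test" (PySem.Str.lower (pvFileA t)))) = true from hc)]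
        rw [if_pos (show decide (pvFileA t ≠ "") = true by simp [hf])]
        rw [List.filter_cons, if_pos hc]
        rw [ih (d0.insert (pvFileA t) (pvIdA t)) (l0 ++ [pvFileA t])]
        simp
      · rw [if_neg (show ¬ ((PySem.Str.endswith (pvFileA t) ".py" &&
            !(PySem.Str.isIn "test" (PySem.Str.lower (pvFileA t)))) = true) from hc)]
        rw [if_pos (show decide (pvFileA t ≠ "") = true by simp [hf])]
        rw [List.filter_cons, if_neg hc]
        exact ih (d0.insert (pvFileA t) (pvIdA t)) l0

-- ===== VERDICT (by name: the statement is the Claim_ definition above) =====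
theorem infer_entry_file_py_spec : Claim_equal_infer_entry_file_py := by
  intro task_list code_artifacts _
  unfold Spec_infer_entry_file_py infer_entry_file_py infer_entry_file_py_alt
  rw [pvPairFold task_list PySem.Dict.empty []]
  simp only [List.nil_append]
  rw [show (fun (b : Nat × String) p => let pr := pvPrio p; if pr < b.1 then (pr, p) else b) =
      pvStep (fun p => pvPats.findIdx (fun pat => PySem.Str.endswith p pat)) from rfl]
  have h : List.findSome? (fun pat =>
        List.find? (fun p => PySem.Str.endswith p pat)
          (List.filter pvIsCand (List.filter (fun s => decide (s ≠ "")) (List.map pvFileA task_list))))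
        pvPats =
      (let r := List.foldl (pvStep (fun p => pvPats.findIdx (fun pat => PySem.Str.endswith p pat)))
          (pvPats.length, "")
          (List.filter pvIsCand (List.filter (fun s => decide (s ≠ "")) (List.map pvFileA task_list)))
       if r.1 < pvPats.length then some r.2 else none) :=
    pvScan_eq (fun p pat => PySem.Str.endswith p pat) pvPats _
  simp only at h
  by_cases hlt : (List.foldl (pvStep (fun p => pvPats.findIdx (fun pat => PySem.Str.endswith p pat)))
      (pvPats.length, "")
      (List.filter pvIsCand (List.filter (fun s => decide (s ≠ "")) (List.map pvFileA task_list)))).1 <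
      pvPats.length
  · rw [if_pos hlt] at h
    rw [h, if_pos hlt]
  · rw [if_neg hlt] at h
    rw [h, if_neg hlt]
    rfl
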